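-- pv_equiv track=rewrite | github.com/sauravujjain/markermind | scripts/gpu_improved_placement.py | interleave_sort
-- ===== SOURCE A (Python) =====
-- def interleave_sort(pieces_list):
--     """Sort pieces alternating between largest and smallest area."""
--     by_area = sorted(pieces_list, key=lambda p: -p['area'])
--     result = []
--     left, right = 0, len(by_area) - 1
--     toggle = True
--     while left <= right:
--         if toggle:
--             result.append(by_area[left])
--             left += 1
--         else:
--             result.append(by_area[right])
--             right -= 1
--         toggle = not toggle
--     return result
-- ===== SOURCE B (Python) =====
-- def interleave_sort(pieces_list):
--     """Sort pieces alternating between largest and smallest area."""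
--     s = sorted(pieces_list, key=lambda p: -p['area'])
--     mid = (len(s) + 1) // 2
--     front = s[:mid]
--     back = s[mid:][::-1]
--     result = []
--     for a, b in zip(front, back):
--         result.append(a)
--         result.append(b)
--     if len(front) > len(back):
--         result.append(front[-1])
--     return result
-- ===== Notes on version B (the rewrite author's own statement) =====
-- stated objective: simpler
-- what changed: Replaces the two-pointer/toggle while-loop with a split of the descending-sorted list into a front half and a reversed back half zipped together (plus the middle element for odd length).
import Mathlib
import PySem

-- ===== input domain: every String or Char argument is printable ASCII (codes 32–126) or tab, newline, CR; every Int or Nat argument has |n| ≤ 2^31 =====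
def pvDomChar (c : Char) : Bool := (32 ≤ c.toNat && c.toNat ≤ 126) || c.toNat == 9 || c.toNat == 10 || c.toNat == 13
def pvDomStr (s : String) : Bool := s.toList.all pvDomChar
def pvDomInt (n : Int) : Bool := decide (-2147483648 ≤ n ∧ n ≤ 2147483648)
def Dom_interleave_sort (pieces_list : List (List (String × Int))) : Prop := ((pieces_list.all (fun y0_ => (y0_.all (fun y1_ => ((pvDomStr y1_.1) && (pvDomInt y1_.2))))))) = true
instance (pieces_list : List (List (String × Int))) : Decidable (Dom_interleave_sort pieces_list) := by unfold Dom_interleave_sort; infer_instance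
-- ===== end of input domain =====

-- B replaces A's two-pointer/toggle while-loop by zipping the front half of the
-- descending-sorted list with the reversed back half (objective: simpler).

-- ===== PORT A =====
-- A's while-loop: two indices left/right into by_area, a toggle, appending to result.
def pvLoopA (s : List (List (String × Int))) (l r : Int) (toggle : Bool)
    (result : List (List (String × Int))) : List (List (String × Int)) :=
  if _h : l ≤ r then
    if toggle then
      pvLoopA s (l + 1) r (!toggle) (result ++ [PySem.List.pyGetD s l []])
    else
      pvLoopA s l (r - 1) (!toggle) (result ++ [PySem.List.pyGetD s r []])
  else result
termination_by (r + 1 - l).toNat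
decreasing_by
  · exact (Int.toNat_lt_toNat (sub_pos.mpr (Int.lt_add_one_of_le _h))).mpr
      (sub_lt_sub_left (lt_add_one l) (r + 1))
  · rw [sub_add_cancel]
    exact (Int.toNat_lt_toNat (sub_pos.mpr (Int.lt_add_one_of_le _h))).mpr
      (sub_lt_sub_right (lt_add_one r) l)

def interleave_sort (pieces_list : List (List (String × Int))) : List (List (String × Int)) :=
  let by_area := PySem.List.sorted pieces_list
      (fun p => -(PySem.Dict.getD (PySem.Dict.mk p) "area" 0)) false
  pvLoopA by_area 0 ((by_area.length : Int) - 1) true []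

-- ===== PORT B =====
def interleave_sort_alt (pieces_list : List (List (String × Int))) : List (List (String × Int)) :=
  let s := PySem.List.sorted pieces_list
      (fun p => -(PySem.Dict.getD (PySem.Dict.mk p) "area" 0)) false
  let mid := PySem.Int.floordiv ((s.length : Int) + 1) 2
  let front := PySem.List.slice s none (some mid)
  let back := (PySem.List.slice? (PySem.List.slice s (some mid) none) none none (-1)).getD []
  let result := (front.zip back).foldl (fun acc ab => acc ++ [ab.1, ab.2]) []
  if back.length < front.length then result ++ [PySem.List.pyGetD front (-1) []] else result

-- ===== PRECONDITION & SPEC =====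
-- Pre_ excludes pieces without an "area" key, on which Python A raises KeyError.
def Pre_interleave_sort (pieces_list : List (List (String × Int))) : Prop :=
  pieces_list.all (fun p => (PySem.Dict.mk p).contains "area") = true
instance (pieces_list : List (List (String × Int))) : Decidable (Pre_interleave_sort pieces_list) := by
  unfold Pre_interleave_sort; infer_instance
def pvWitness_interleave_sort : (List (List (String × Int))) :=
  [[("area", 3)], [("area", 1)], [("area", 2)]]
def Spec_interleave_sort (pieces_list : List (List (String × Int))) (out : List (List (String × Int))) : Prop := out = interleave_sort_alt pieces_list
instance (pieces_list : List (List (String × Int))) (out : List (List (String × Int))) : Decidable (Spec_interleave_sort pieces_list out) := by unfold Spec_interleave_sort; infer_instance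

-- ===== CLAIM (what is proved, stated in full; the proofs are below) =====
def Claim_equal_interleave_sort : Prop := ∀ (pieces_list : List (List (String × Int))), Dom_interleave_sort pieces_list → Pre_interleave_sort pieces_list → Spec_interleave_sort pieces_list (interleave_sort pieces_list)

-- ===== LEMMAS AND PROOFS =====

-- Common description of both orders: take alternately from the front and the back.
def pvIL {α : Type} : List α → Bool → List α
  | [], _ => []
  | a :: t, true => a :: pvIL t false
  | a :: t, false => (a :: t).getLast (List.cons_ne_nil a t) :: pvIL (a :: t).dropLast true
termination_by xs _ => xs.length
decreasing_by all_goals simp [List.length_dropLast]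

theorem pvIL_cons_true {α : Type} (a : α) (t : List α) :
    pvIL (a :: t) true = a :: pvIL t false := by
  rw [pvIL]

theorem pvIL_false_append {α : Type} (u : List α) (z : α) :
    pvIL (u ++ [z]) false = z :: pvIL u true := by
  cases u with
  | nil => simp [pvIL]
  | cons b u' =>
    rw [List.cons_append]
    conv_lhs => rw [pvIL]
    congr 1
    · rw [List.getLast_cons (by simp : u' ++ [z] ≠ [])]
      simp
    · rw [← List.cons_append, List.dropLast_concat]

theorem pvLoopA_eq (s : List (List (String × Int))) :
    ∀ (n : Nat) (l r : Int) (tog : Bool) (acc : List (List (String × Int))),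
      0 ≤ l → r < (s.length : Int) → (r + 1 - l).toNat = n →
      pvLoopA s l r tog acc = acc ++ pvIL ((s.drop l.toNat).take (r + 1 - l).toNat) tog := by
  intro n
  induction n with
  | zero =>
    intro l r tog acc hl hr hn
    rw [pvLoopA]
    have : ¬ l ≤ r := by omega
    rw [dif_neg this, hn]
    simp only [List.take_zero]
    cases tog <;> simp [pvIL]
  | succ n ih =>
    intro l r tog acc hl hr hn
    have hlr : l ≤ r := by omega
    have hlen : l.toNat < s.length := by omega
    rw [pvLoopA]
    rw [dif_pos hlr]
    cases tog with
    | true =>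
      simp only [Bool.not_true]
      rw [ih (l + 1) r false _ (by omega) hr (by omega)]
      have hsub : (s.drop l.toNat).take (r + 1 - l).toNat
          = s[l.toNat] :: ((s.drop (l + 1).toNat).take (r + 1 - (l + 1)).toNat) := by
        have hd : s.drop l.toNat = s[l.toNat] :: s.drop (l.toNat + 1) := by
          rw [List.drop_eq_getElem_cons hlen]
        have hstep : (l + 1).toNat = l.toNat + 1 := by omega
        have hcnt : (r + 1 - l).toNat = (r + 1 - (l + 1)).toNat + 1 := by omega
        rw [hstep, hcnt, hd, List.take_succ_cons]
      rw [hsub, pvIL_cons_true]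
      have hget : PySem.List.pyGetD s l [] = s[l.toNat] :=
        PySem.List.pyGetD_eq_getElem s [] hl (by omega)
      rw [hget]
      simp
    | false =>
      simp only [Bool.not_false]
      rw [ih l (r - 1) true _ hl (by omega) (by omega)]
      have hrlen : r.toNat < s.length := by omega
      have hsub : (s.drop l.toNat).take (r + 1 - l).toNat
          = ((s.drop l.toNat).take (r - 1 + 1 - l).toNat) ++ [s[r.toNat]] := by
        have h1 : (r + 1 - l).toNat = (r - 1 + 1 - l).toNat + 1 := by omega
        rw [h1, List.take_add_one]
        have hidx : (s.drop l.toNat)[(r - 1 + 1 - l).toNat]? = some s[r.toNat] := by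
          rw [List.getElem?_drop]
          rw [List.getElem?_eq_getElem (by omega)]
          congr 1
          congr 1
          omega
        rw [hidx]
        rfl
      rw [hsub, pvIL_false_append]
      have hget : PySem.List.pyGetD s r [] = s[r.toNat] :=
        PySem.List.pyGetD_eq_getElem s [] (by omega) (by omega)
      rw [hget]
      simp

-- B's construction, written over the Nat midpoint (what port B computes after the
-- slice/floordiv bookkeeping).
def pvZB (xs : List (List (String × Int))) : List (List (String × Int)) :=
  let m := (xs.length + 1) / 2
  let front := xs.take m
  let back := (xs.drop m).reverse
  let result := (front.zip back).foldl (fun acc ab => acc ++ [ab.1, ab.2]) []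
  if back.length < front.length then result ++ [PySem.List.pyGetD front (-1) []] else result

theorem pvFold_eq_flatMap {α : Type} (l : List (α × α)) :
    l.foldl (fun acc ab => acc ++ [ab.1, ab.2]) [] = l.flatMap (fun ab => [ab.1, ab.2]) := by
  have := PySem.List.foldl_append_eq_flatMap (fun ab : α × α => [ab.1, ab.2]) l ([] : List α)
  simpa using this

theorem pvZB_nil : pvZB [] = [] := by decide

theorem pvZB_single (a : List (String × Int)) : pvZB [a] = [a] := by
  simp [pvZB, PySem.List.pyGetD_neg_one]

theorem pvZB_step (a z : List (String × Int)) (u : List (List (String × Int))) :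
    pvZB (a :: (u ++ [z])) = a :: z :: pvZB u := by
  have hmu : ((a :: (u ++ [z])).length + 1) / 2 = (u.length + 1) / 2 + 1 := by
    simp; omega
  have hmule : (u.length + 1) / 2 ≤ u.length := by omega
  unfold pvZB
  rw [hmu]
  simp only [List.take_succ_cons, List.drop_succ_cons]
  rw [List.take_append_of_le_length hmule, List.drop_append_of_le_length hmule]
  rw [List.reverse_append]
  simp only [List.reverse_cons, List.reverse_nil, List.nil_append, List.singleton_append,
    List.zip_cons_cons]
  rw [pvFold_eq_flatMap, pvFold_eq_flatMap]
  simp only [List.flatMap_cons]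
  have hlf : (u.take ((u.length + 1) / 2)).length = (u.length + 1) / 2 := by
    simp [hmule]
  have hlb : ((u.drop ((u.length + 1) / 2)).reverse).length = u.length - (u.length + 1) / 2 := by
    simp
  by_cases hc : ((u.drop ((u.length + 1) / 2)).reverse).length < (u.take ((u.length + 1) / 2)).length
  · have hc' : ((u.drop ((u.length + 1) / 2)).reverse).length + 1
        < (u.take ((u.length + 1) / 2)).length + 1 := by omega
    rw [if_pos (by simp only [List.length_cons]; omega), if_pos hc]
    have hne : u.take ((u.length + 1) / 2) ≠ [] := by
      rw [hlf] at hc; rw [hlb] at hc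
      intro h
      rw [h] at hlf
      simp at hlf
      omega
    have h1 : PySem.List.pyGetD (a :: u.take ((u.length + 1) / 2)) (-1) []
        = PySem.List.pyGetD (u.take ((u.length + 1) / 2)) (-1) [] := by
      rw [PySem.List.pyGetD_neg_one (a :: u.take ((u.length + 1) / 2)) [] (by simp),
        PySem.List.pyGetD_neg_one (u.take ((u.length + 1) / 2)) [] hne]
      exact List.getLast_cons hne
    rw [h1]
    simp
  · have hcx : ¬ ((z :: (u.drop ((u.length + 1) / 2)).reverse).length
        < (a :: u.take ((u.length + 1) / 2)).length) := by
      simp only [List.length_cons]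
      omega
    rw [if_neg hcx, if_neg hc]
    simp

theorem pvZB_eq_pvIL : ∀ (xs : List (List (String × Int))), pvZB xs = pvIL xs true := by
  have key : ∀ (n : Nat) (xs : List (List (String × Int))), xs.length ≤ n →
      pvZB xs = pvIL xs true := by
    intro n
    induction n with
    | zero =>
      intro xs h
      have : xs = [] := by
        cases xs with
        | nil => rfl
        | cons a t => simp at h
      rw [this, pvZB_nil, pvIL]
    | succ n ih =>
      intro xs h
      cases xs with
      | nil => rw [pvZB_nil, pvIL]
      | cons a t =>
        cases ht : t with
        | nil => rw [pvZB_single]; rw [pvIL, pvIL]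
        | cons b t' =>
          have htne : t ≠ [] := by rw [ht]; simp
          have hdecomp : t = t.dropLast ++ [t.getLast htne] := by
            exact (List.dropLast_append_getLast htne).symm
          rw [← ht]
          conv_lhs => rw [hdecomp]
          rw [pvZB_step]
          rw [pvIL_cons_true]
          conv_rhs => rw [hdecomp]
          rw [pvIL_false_append]
          congr 1
          congr 1
          apply ih
          have h1 : t.length ≤ n := by
            rw [ht] at h ⊢
            simp at h ⊢
            omega
          have h2 : t.dropLast.length = t.length - 1 := List.length_dropLast
          omega
  intro xs
  exact key xs.length xs le_rfl

theorem pvFloordiv_half (n : Nat) :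
    PySem.Int.floordiv ((n : Int) + 1) 2 = (((n + 1) / 2 : Nat) : Int) := by
  have h1 : ((n : Int) + 1) = ((n + 1 : Nat) : Int) := by push_cast; ring
  rw [h1]
  simp

theorem pvAlt_eq_pvZB (pieces_list : List (List (String × Int))) :
    interleave_sort_alt pieces_list
      = pvZB (PySem.List.sorted pieces_list
          (fun p => -(PySem.Dict.getD (PySem.Dict.mk p) "area" 0)) false) := by
  unfold interleave_sort_alt pvZB
  simp only [pvFloordiv_half, PySem.List.slice_to_natCast, PySem.List.slice_from_natCast,
    PySem.List.slice?_none_none_neg_one, Option.getD_some]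

-- ===== VERDICT (by name: the statement is the Claim_ definition above) =====
theorem interleave_sort_spec : Claim_equal_interleave_sort := by
  intro pieces_list _hdom _hpre
  unfold Spec_interleave_sort
  rw [pvAlt_eq_pvZB, pvZB_eq_pvIL]
  unfold interleave_sort
  set s := PySem.List.sorted pieces_list
      (fun p => -(PySem.Dict.getD (PySem.Dict.mk p) "area" 0)) false with hs
  rw [pvLoopA_eq s s.length 0 ((s.length : Int) - 1) true [] (by omega) (by omega) (by omega)]
  simp
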